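-- pv_equiv track=rewrite | github.com/zhanglongnation/codeforbio | interProscan.py | long
-- ===== SOURCE A (Python) =====
-- def long(ta):
--     x=[]
--     for i in ta:
--         x.append(len(set(i)))
--     if len(x)!= 0:
--         return max(x),x.index(max(x))
--     else:
--         return 0,0
-- ===== SOURCE B (Python) =====
-- def long(ta):
--     best_count, best_idx = 0, 0
--     for idx, item in enumerate(ta):
--         c = len(set(item))
--         if c > best_count:
--             best_count, best_idx = c, idx
--     return best_count, best_idx
-- ===== Notes on version B (the rewrite author's own statement) =====
-- stated objective: simpler
-- what changed: single enumerate pass keeping a running (best_count, best_idx) with strict '>' instead of building the full counts list and rescanning it with two max() calls plus an index() lookup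
import Mathlib
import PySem

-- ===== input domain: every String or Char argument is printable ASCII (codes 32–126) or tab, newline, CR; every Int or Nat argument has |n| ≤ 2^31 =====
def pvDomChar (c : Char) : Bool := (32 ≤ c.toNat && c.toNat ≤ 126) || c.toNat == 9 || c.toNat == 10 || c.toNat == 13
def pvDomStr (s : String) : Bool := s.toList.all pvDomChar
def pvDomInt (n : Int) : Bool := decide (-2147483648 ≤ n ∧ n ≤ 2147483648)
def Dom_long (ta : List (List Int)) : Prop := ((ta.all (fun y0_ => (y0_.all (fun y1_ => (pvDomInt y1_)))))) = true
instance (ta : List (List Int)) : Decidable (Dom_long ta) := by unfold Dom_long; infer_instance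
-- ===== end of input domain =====

-- B changes the decomposition: one pass with a running (best_count, best_idx) instead of
-- A's build-the-counts-list-then-rescan (two max() calls and an index() lookup); same cost class.

-- ===== PORT A =====
def long (ta : List (List Int)) : Int × Int :=
  let x : List Int := ta.foldl (fun acc i => acc ++ [((PySem.Set.ofList i).length : Int)]) []
  if x.length ≠ 0 then
    match PySem.List.max? x (fun v => v) with
    | some m => (m, (((PySem.List.index? x m).getD 0 : Nat) : Int))
    | none => (0, 0)   -- unreachable: x ≠ [] (totality guard only)
  else (0, 0)

-- ===== PORT B =====
def long_alt (ta : List (List Int)) : Int × Int :=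
  (PySem.List.enumerate ta 0).foldl
    (fun best p =>
      let c : Int := ((PySem.Set.ofList p.2).length : Int)
      if best.1 < c then (c, p.1) else best)
    (0, 0)

-- ===== PRECONDITION & SPEC =====
def Spec_long (ta : List (List Int)) (out : Int × Int) : Prop := out = long_alt ta
instance (ta : List (List Int)) (out : Int × Int) : Decidable (Spec_long ta out) := by unfold Spec_long; infer_instance

-- ===== CLAIM (what is proved, stated in full; the proofs are below) =====
def Claim_equal_long : Prop := ∀ (ta : List (List Int)), Dom_long ta → Spec_long ta (long ta)

-- ===== LEMMAS AND PROOFS =====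

def pvCnt (i : List Int) : Int := ((PySem.Set.ofList i).length : Int)

theorem pv_le_foldl_max (l : List Int) (b : Int) : b ≤ l.foldl max b := by
  induction l generalizing b with
  | nil => simp
  | cons a t ih => exact le_trans (le_max_left b a) (ih (max b a))

theorem pv_map_build (l : List (List Int)) (acc : List Int) :
    l.foldl (fun acc i => acc ++ [pvCnt i]) acc = acc ++ l.map pvCnt := by
  induction l generalizing acc with
  | nil => simp
  | cons a t ih => simp [List.foldl_cons, ih]

-- B's fold, characterised: result max and first index of the max among the new values.
theorem pv_fold_char (l : List (List Int)) (b j s : Int) :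
    (PySem.List.enumerate l s).foldl
      (fun best p =>
        let c : Int := pvCnt p.2
        if best.1 < c then (c, p.1) else best) (b, j)
    = ((l.map pvCnt).foldl max b,
       if b < (l.map pvCnt).foldl max b
       then s + (((l.map pvCnt).idxOf ((l.map pvCnt).foldl max b) : Nat) : Int)
       else j) := by
  induction l generalizing b j s with
  | nil => simp
  | cons a t ih =>
    rw [PySem.List.enumerate_cons, List.foldl_cons]
    simp only [List.map_cons, List.foldl_cons]
    by_cases hba : b < pvCnt a
    · rw [if_pos hba, ih]
      have hmax : max b (pvCnt a) = pvCnt a := max_eq_right (le_of_lt hba)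
      have haM : pvCnt a ≤ (t.map pvCnt).foldl max (pvCnt a) := pv_le_foldl_max _ _
      have hbM : b < (t.map pvCnt).foldl max (max b (pvCnt a)) := by
        rw [hmax]; exact lt_of_lt_of_le hba haM
      rw [if_pos hbM, hmax]
      by_cases heq : pvCnt a = (t.map pvCnt).foldl max (pvCnt a)
      · rw [if_neg (by rw [← heq]; exact lt_irrefl _), ← heq, List.idxOf_cons_self]
        simp
      · have hlt : pvCnt a < (t.map pvCnt).foldl max (pvCnt a) := lt_of_le_of_ne haM heq
        rw [if_pos hlt]
        rw [List.idxOf_cons_ne _ (fun h => heq h)]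
        push_cast
        ring_nf
    · rw [if_neg hba, ih]
      have hmax : max b (pvCnt a) = b := max_eq_left (le_of_not_gt hba)
      rw [hmax]
      by_cases hbM : b < (t.map pvCnt).foldl max b
      · rw [if_pos hbM, if_pos hbM]
        have hne : pvCnt a ≠ (t.map pvCnt).foldl max b := by
          intro h
          exact hba (h ▸ hbM)
        rw [List.idxOf_cons_ne _ hne]
        push_cast
        ring_nf
      · rw [if_neg hbM, if_neg hbM]

theorem pv_cnt_nonneg (i : List Int) : 0 ≤ pvCnt i := by
  simp [pvCnt]

-- ===== VERDICT (by name: the statement is the Claim_ definition above) =====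
theorem long_spec : Claim_equal_long := by
  intro ta _
  unfold Spec_long long long_alt
  rw [show (fun acc i => acc ++ [((PySem.Set.ofList i).length : Int)])
        = (fun acc i => acc ++ [pvCnt i]) from rfl,
      pv_map_build, List.nil_append,
      show (fun (best : Int × Int) (p : Int × List Int) =>
        let c : Int := ((PySem.Set.ofList p.2).length : Int)
        if best.1 < c then (c, p.1) else best)
        = (fun best p => let c : Int := pvCnt p.2; if best.1 < c then (c, p.1) else best) from rfl,
      pv_fold_char]
  cases hta : ta with
  | nil => simp
  | cons a t =>
    have hx : (a :: t).map pvCnt = pvCnt a :: t.map pvCnt := rfl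
    rw [hx]
    simp only [List.length_cons, List.foldl_cons]
    rw [if_pos (by simp)]
    have h0 : max 0 (pvCnt a) = pvCnt a := max_eq_right (pv_cnt_nonneg a)
    rw [h0]
    set M := (t.map pvCnt).foldl max (pvCnt a) with hM
    have hmaxq : PySem.List.max? (pvCnt a :: t.map pvCnt) (fun v => v) = some M := by
      simpa using PySem.List.max?_id_cons (pvCnt a) (t.map pvCnt)
    rw [hmaxq]
    have haM : pvCnt a ≤ M := pv_le_foldl_max _ _
    have hMnn : 0 ≤ M := le_trans (pv_cnt_nonneg a) haM
    by_cases h0M : (0 : Int) < M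
    · rw [if_pos h0M]
      simp only [PySem.List.index?_eq_idxOf?]
      by_cases heq : pvCnt a = M
      · rw [← heq, List.idxOf_cons_self]
        have : List.idxOf? (pvCnt a) (pvCnt a :: t.map pvCnt) = some 0 := by
          simp [List.idxOf?_cons]
        rw [this]
        simp
      · have hne : pvCnt a ≠ M := heq
        have hmem : M ∈ t.map pvCnt := by
          -- M = foldl max (pvCnt a) l and M ≠ pvCnt a forces membership
          clear hmaxq h0M
          have : ∀ (l : List Int) (b : Int), b ≠ l.foldl max b → l.foldl max b ∈ l := by
            intro l
            induction l with
            | nil => intro b hb; exact absurd rfl hb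
            | cons c r ihr =>
              intro b hb
              simp only [List.foldl_cons] at hb ⊢
              by_cases hbc : max b c = b
              · rw [hbc] at hb ⊢
                exact List.mem_cons_of_mem _ (ihr b hb)
              · have hbc' : max b c = c := by
                  rcases max_choice b c with h | h
                  · exact absurd h hbc
                  · exact h
                rw [hbc'] at hb ⊢
                by_cases hcr : c = r.foldl max c
                · rw [← hcr]; exact List.mem_cons_self
                · exact List.mem_cons_of_mem _ (ihr c hcr)
          exact this (t.map pvCnt) (pvCnt a) (fun h => hne (by rw [hM, ← h]))
        have hmem' : M ∈ pvCnt a :: t.map pvCnt := List.mem_cons_of_mem _ hmem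
        obtain ⟨k, hk⟩ := Option.isSome_iff_exists.mp (List.isSome_idxOf?.mpr hmem')
        have hkid : List.idxOf M (pvCnt a :: t.map pvCnt) = k := by
          rw [List.idxOf_eq_getD_idxOf?, hk]; rfl
        rw [hk, hkid]
        simp
    · have hM0 : M = 0 := le_antisymm (le_of_not_gt h0M) hMnn
      rw [if_neg h0M]
      have ha0 : pvCnt a = 0 := le_antisymm (hM0 ▸ haM) (pv_cnt_nonneg a)
      simp only [PySem.List.index?_eq_idxOf?]
      have : List.idxOf? M (pvCnt a :: t.map pvCnt) = some 0 := by
        simp [List.idxOf?_cons, hM0, ha0]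
      rw [this]
      simp
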